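-- pv_equiv track=rewrite | github.com/kidexp/91leetcode | search/ShortestCycleContainingTargetNodeQuestion.py | solve
-- ===== SOURCE A (Python) =====
-- from collections import deque, defaultdict
--
-- def solve(graph, target):
--     if not graph:
--         return -1
--     graph_dict = defaultdict(list)
--     m = len(graph)
--     for i in range(m):
--         for j in graph[i]:
--             graph_dict[i].append(j)
--     queue = deque([target])
--     visited_set = set()
--     level = 0
--     while queue:
--         level += 1
--         queue_size = len(queue)
--         for _ in range(queue_size):
--             node = queue.pop()
--             for next_node in graph_dict[node]:
--                 if next_node == target:
--                     return level
--                 elif next_node not in visited_set: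
--                     visited_set.add(next_node)
--                     queue.appendleft(next_node)
--     return -1
-- ===== SOURCE B (Python) =====
-- def solve(graph, target):
--     if not graph:
--         return -1
--     m = len(graph)
--     reach = {target}
--     level = 0
--     while True:
--         level += 1
--         nxt = set(reach)
--         for u in reach:
--             if 0 <= u < m:
--                 if target in graph[u]:
--                     return level
--                 nxt.update(graph[u])
--         if nxt == reach:
--             return -1
--         reach = nxt
-- ===== Notes on version B (the rewrite author's own statement) =====
-- stated objective: alternative
-- what changed: Replaces the queue-and-visited-set BFS with naive fixed-point iteration of the one-step reachability operator: a cumulative set of reached nodes is rescanned in full each round (checking every reached node for an edge back to the target) until it stops growing; no queue, no frontier, no visited set.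
import Mathlib
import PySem

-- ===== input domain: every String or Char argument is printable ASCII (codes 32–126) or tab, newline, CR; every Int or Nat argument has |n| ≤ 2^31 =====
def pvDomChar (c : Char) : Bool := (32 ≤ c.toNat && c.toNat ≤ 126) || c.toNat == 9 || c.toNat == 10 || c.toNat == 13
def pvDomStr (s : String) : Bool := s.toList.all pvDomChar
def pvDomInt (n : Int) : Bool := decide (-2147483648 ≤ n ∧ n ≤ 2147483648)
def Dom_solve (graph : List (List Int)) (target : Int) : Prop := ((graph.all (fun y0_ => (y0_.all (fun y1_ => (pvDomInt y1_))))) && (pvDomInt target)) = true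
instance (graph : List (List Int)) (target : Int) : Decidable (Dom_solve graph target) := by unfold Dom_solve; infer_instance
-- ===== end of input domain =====

-- B replaces A's queue-and-visited-set BFS by naive fixed-point iteration of the one-step
-- reachability operator: a cumulative reached set is rescanned in full each round until it
-- stops growing; same return value, different algorithm (no queue, no frontier, no visited set).

-- ===== PORT A =====
-- A builds graph_dict = defaultdict(list) filled by appends
def pvBuildDict (graph : List (List Int)) : PySem.Dict Int (List Int) :=
  (PySem.List.enumerate graph 0).foldl
    (fun d p => p.2.foldl (fun d j => d.modify p.1 [] (fun l => l ++ [j])) d)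
    PySem.Dict.empty

-- inner 'for next_node in graph_dict[node]' loop of A (early return = some level)
def solveProcess (target : Int) (ns q : List Int) (vis : PySem.Set Int) (level : Int) :
    Option Int × List Int × PySem.Set Int :=
  match ns with
  | [] => (none, q, vis)
  | n :: rest =>
    if n = target then (some level, q, vis)
    else if PySem.Set.contains vis n then solveProcess target rest q vis level
    else solveProcess target rest (q ++ [n]) (PySem.Set.add vis n) level

-- A's while/for batch loop; the deque is stored pop-end first (pop() = head, appendleft = ++ [x]).
-- r is the remaining count of the inner 'for _ in range(queue_size)'; r = 0 means the outer
-- 'while queue' test.  fuel is a termination guard only (each enqueued node is popped at most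
-- once, so the supplied fuel is never exhausted); on fuel 0 it returns -1, an unreachable case.
def solveLoop (fuel : Nat) (target : Int) (gd : PySem.Dict Int (List Int)) (q : List Int)
    (vis : PySem.Set Int) (r : Nat) (level : Int) : Int :=
  match fuel with
  | 0 => -1
  | fuel + 1 =>
    match r, q with
    | _, [] => -1
    | 0, q => solveLoop fuel target gd q vis q.length (level + 1)
    | r + 1, n :: rest =>
      match solveProcess target (gd.getD n []) rest vis level with
      | (some l, _, _) => l
      | (none, q', vis') => solveLoop fuel target gd q' vis' r level

def solve (graph : List (List Int)) (target : Int) : Int :=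
  if graph = [] then -1
  else solveLoop (2 * (graph.map List.length).sum + 6) target (pvBuildDict graph)
        [target] PySem.Set.empty 0 0

-- ===== PORT B =====
-- inner 'for u in reach' loop of B (early return = some level); the result does not depend
-- on the iteration order of the Python set
def solveAltInner (graph : List (List Int)) (m target : Int) (us : List Int)
    (nxt : PySem.Set Int) (level : Int) : Option Int × PySem.Set Int :=
  match us with
  | [] => (none, nxt)
  | u :: rest =>
    if 0 ≤ u ∧ u < m then
      if target ∈ (PySem.List.pyGet? graph u).getD [] then (some level, nxt)
      else solveAltInner graph m target rest
            (PySem.Set.update nxt ((PySem.List.pyGet? graph u).getD [])) level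
    else solveAltInner graph m target rest nxt level

-- B's 'while True' round loop; fuel is a termination guard only (reach grows strictly every
-- continued round inside a finite universe, so the supplied fuel is never exhausted)
def solveAltLoop (fuel : Nat) (graph : List (List Int)) (m target : Int)
    (reach : PySem.Set Int) (level : Int) : Int :=
  match fuel with
  | 0 => -1
  | fuel + 1 =>
    match solveAltInner graph m target reach (PySem.Set.ofList reach) (level + 1) with
    | (some l, _) => l
    | (none, nxt) =>
      if PySem.Set.equal nxt reach then -1
      else solveAltLoop fuel graph m target nxt (level + 1)

def solve_alt (graph : List (List Int)) (target : Int) : Int :=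
  if graph = [] then -1
  else solveAltLoop (graph.flatten.length + 2) graph (graph.length : Int) target
        (PySem.Set.add PySem.Set.empty target) 0

-- ===== PRECONDITION & SPEC =====
def Spec_solve (graph : List (List Int)) (target : Int) (out : Int) : Prop := out = solve_alt graph target
instance (graph : List (List Int)) (target : Int) (out : Int) : Decidable (Spec_solve graph target out) := by unfold Spec_solve; infer_instance

-- ===== CLAIM (what is proved, stated in full; the proofs are below) =====
def Claim_equal_solve : Prop := ∀ (graph : List (List Int)) (target : Int), Dom_solve graph target → Spec_solve graph target (solve graph target)

-- ===== LEMMAS AND PROOFS =====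

-- adjacency of node n as both programs see it ([] off range, like the defaultdict)
def pvAdj (graph : List (List Int)) (n : Int) : List Int :=
  if 0 ≤ n ∧ n < (graph.length : Int) then (PySem.List.pyGet? graph n).getD [] else []

-- nodes reachable from target in at most k steps
def pvDLe (graph : List (List Int)) (target : Int) : Nat → Int → Prop
  | 0, v => v = target
  | k + 1, v => pvDLe graph target k v ∨ ∃ u, pvDLe graph target k u ∧ v ∈ pvAdj graph u

-- some node at distance ≤ k has an edge back to target
def pvHit (graph : List (List Int)) (target : Int) (k : Nat) : Prop :=
  ∃ u, pvDLe graph target k u ∧ target ∈ pvAdj graph u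

-- node at distance exactly k
def pvExact (graph : List (List Int)) (target : Int) (k : Nat) (x : Int) : Prop :=
  pvDLe graph target k x ∧ ∀ j, j < k → ¬ pvDLe graph target j x

-- the common answer both programs compute
def pvSpecVal (graph : List (List Int)) (target : Int) (ans : Int) : Prop :=
  (∃ K : Nat, pvHit graph target K ∧ (∀ j, j < K → ¬ pvHit graph target j) ∧ ans = (K : Int) + 1) ∨
  ((∀ K, ¬ pvHit graph target K) ∧ ans = -1)

lemma pvSpecVal_unique (g : List (List Int)) (t a b : Int)
    (ha : pvSpecVal g t a) (hb : pvSpecVal g t b) : a = b := by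
  rcases ha with ⟨K1, h1, l1, e1⟩ | ⟨n1, e1⟩ <;> rcases hb with ⟨K2, h2, l2, e2⟩ | ⟨n2, e2⟩
  · rcases Nat.lt_trichotomy K1 K2 with h | h | h
    · exact absurd h1 (l2 _ h)
    · subst h; rw [e1, e2]
    · exact absurd h2 (l1 _ h)
  · exact absurd h1 (n2 K1)
  · exact absurd h2 (n1 K2)
  · rw [e1, e2]

lemma pvDLe_mono (g : List (List Int)) (t : Int) {j k : Nat} (h : j ≤ k) {x : Int}
    (hx : pvDLe g t j x) : pvDLe g t k x := by
  induction k with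
  | zero => cases Nat.le_zero.1 h; exact hx
  | succ k ih =>
    by_cases hj : j = k + 1
    · subst hj; exact hx
    · exact Or.inl (ih (Nat.lt_succ_iff.1 (Nat.lt_of_le_of_ne h hj)))

lemma pvStab (g : List (List Int)) (t : Int) (L : Nat)
    (h : ∀ x, pvDLe g t (L + 1) x → pvDLe g t L x) :
    ∀ j, L ≤ j → ∀ x, pvDLe g t j x → pvDLe g t L x := by
  intro j hj
  induction j, hj using Nat.le_induction with
  | base => exact fun x hx => hx
  | succ j hLj ih =>
    intro x hx
    rcases hx with hx | ⟨u, hu, hadj⟩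
    · exact ih x hx
    · exact h x (Or.inr ⟨u, ih u hu, hadj⟩)

lemma pvAdj_sub_flatten (g : List (List Int)) (n x : Int) (hx : x ∈ pvAdj g n) :
    x ∈ g.flatten := by
  unfold pvAdj at hx
  split_ifs at hx with hc
  · cases h : PySem.List.pyGet? g n with
    | none => rw [h] at hx; simp at hx
    | some l =>
      rw [h] at hx
      have hl : l ∈ g := by
        have := PySem.List.mem_of_pyGet?_eq_some (xs := g) (i := n) (x := l)
        exact this h
      exact List.mem_flatten.2 ⟨l, hl, hx⟩
  · simp at hx

lemma pvDLe_mem_U (g : List (List Int)) (t : Int) (k : Nat) (x : Int)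
    (hx : pvDLe g t k x) : x ∈ t :: g.flatten := by
  induction k with
  | zero => rw [hx]; exact List.mem_cons_self
  | succ k ih =>
    rcases hx with hx | ⟨u, _, hadj⟩
    · exact ih hx
    · exact List.mem_cons_of_mem _ (pvAdj_sub_flatten g u x hadj)

lemma pvLeast (g : List (List Int)) (t : Int) (k : Nat) (x : Int) (hx : pvDLe g t k x) :
    ∃ j, j ≤ k ∧ pvExact g t j x := by
  induction k with
  | zero => exact ⟨0, le_refl _, hx, by omega⟩
  | succ k ih =>
    by_cases h : pvDLe g t k x
    · obtain ⟨j, hj, he⟩ := ih h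
      exact ⟨j, Nat.le_succ_of_le hj, he⟩
    · refine ⟨k + 1, le_refl _, hx, fun j hj hdj => ?_⟩
      exact h (pvDLe_mono g t (Nat.lt_succ_iff.1 hj) hdj)

lemma pvExact_succ (g : List (List Int)) (t : Int) (k : Nat) (x : Int) :
    pvExact g t (k + 1) x ↔
      ¬ pvDLe g t k x ∧ ∃ u, pvDLe g t k u ∧ x ∈ pvAdj g u := by
  constructor
  · rintro ⟨hd, hlt⟩
    have hk := hlt k (Nat.lt_succ_self k)
    rcases hd with hd | he
    · exact absurd hd hk
    · exact ⟨hk, he⟩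
  · rintro ⟨hk, he⟩
    refine ⟨Or.inr he, fun j hj hdj => ?_⟩
    exact hk (pvDLe_mono g t (Nat.lt_succ_iff.1 hj) hdj)

lemma pvCard_le {l U : List Int} (hnd : l.Nodup) (hsub : ∀ x ∈ l, x ∈ U) :
    l.length ≤ U.length := by
  calc l.length = l.toFinset.card := (List.toFinset_card_of_nodup hnd).symm
    _ ≤ U.toFinset.card := Finset.card_le_card
        (fun y hy => List.mem_toFinset.2 (hsub y (List.mem_toFinset.1 hy)))
    _ ≤ U.length := U.toFinset_card_le

lemma pvCard_lt {l U : List Int} (hnd : l.Nodup) (hnd2 : U.Nodup)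
    (hsub : ∀ x ∈ l, x ∈ U) (x : Int) (hxU : x ∈ U) (hxl : x ∉ l) :
    l.length < U.length := by
  have hss : l.toFinset ⊂ U.toFinset := by
    rw [Finset.ssubset_iff_subset_ne]
    refine ⟨fun y hy => List.mem_toFinset.2 (hsub y (List.mem_toFinset.1 hy)), fun he => ?_⟩
    exact hxl (List.mem_toFinset.1 (he ▸ List.mem_toFinset.2 hxU))
  calc l.length = l.toFinset.card := (List.toFinset_card_of_nodup hnd).symm
    _ < U.toFinset.card := Finset.card_lt_card hss
    _ = U.length := List.toFinset_card_of_nodup hnd2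

lemma pvBuild_inner (i : Int) (row : List Int) : ∀ (d : PySem.Dict Int (List Int)) (n : Int),
    (row.foldl (fun d j => d.modify i [] (fun l => l ++ [j])) d).getD n [] =
    if n = i then d.getD i [] ++ row else d.getD n [] := by
  induction row with
  | nil =>
    intro d n
    split_ifs with h
    · subst h; simp
    · rfl
  | cons j row ih =>
    intro d n
    rw [List.foldl_cons, ih]
    split_ifs with h
    · subst h
      rw [PySem.Dict.getD_modify_self, List.append_assoc]
      rfl
    · rw [PySem.Dict.getD_modify_of_ne _ _ _ h]

lemma pvBuild_outer (rows : List (List Int)) : ∀ (s : Int) (d : PySem.Dict Int (List Int)) (n : Int),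
    ((PySem.List.enumerate rows s).foldl
      (fun d p => p.2.foldl (fun d j => d.modify p.1 [] (fun l => l ++ [j])) d) d).getD n [] =
    if s ≤ n ∧ n < s + (rows.length : Int) then d.getD n [] ++ ((rows[(n - s).toNat]?).getD [])
    else d.getD n [] := by
  induction rows with
  | nil =>
    intro s d n
    rw [PySem.List.enumerate_nil, List.foldl_nil]
    split_ifs with h
    · exfalso; simp at h; omega
    · rfl
  | cons row rows ih =>
    intro s d n
    rw [PySem.List.enumerate_cons, List.foldl_cons, ih, pvBuild_inner]
    simp only [List.length_cons]
    by_cases hB : n = s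
    · subst hB
      rw [if_pos rfl, if_neg (by omega : ¬(n + 1 ≤ n ∧ n < n + 1 + (rows.length : Int))),
        if_pos (by omega : n ≤ n ∧ n < n + ((rows.length : Nat) + 1 : Nat))]
      simp
    · rw [if_neg hB]
      by_cases hA : s + 1 ≤ n ∧ n < s + 1 + (rows.length : Int)
      · rw [if_pos hA, if_pos (by omega : s ≤ n ∧ n < s + ((rows.length : Nat) + 1 : Nat))]
        have ht : (n - s).toNat = (n - (s + 1)).toNat + 1 := by omega
        rw [ht, List.getElem?_cons_succ]
      · rw [if_neg hA, if_neg (by omega : ¬(s ≤ n ∧ n < s + ((rows.length : Nat) + 1 : Nat)))]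

-- graph_dict lookups are pvAdj
lemma pvGetD_build (g : List (List Int)) (n : Int) :
    (pvBuildDict g).getD n [] = pvAdj g n := by
  unfold pvBuildDict pvAdj
  rw [pvBuild_outer]
  split_ifs with h1 h2 h2
  · rw [PySem.Dict.getD_empty, PySem.List.pyGet?_of_nonneg _ h1.1]
    simp
  · exfalso; simp at h1; omega
  · exfalso; simp at h1; omega
  · exact PySem.Dict.getD_empty _ _

lemma pvSet_add_not_mem {s : PySem.Set Int} {x : Int} (h : x ∉ s) :
    PySem.Set.add s x = s ++ [x] := by
  simp [PySem.Set.add, h]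

lemma pvNodup_update (xs : List Int) : ∀ (s : PySem.Set Int), s.Nodup →
    (PySem.Set.update s xs).Nodup := by
  induction xs with
  | nil => exact fun s h => h
  | cons x xs ih =>
    intro s hs
    exact ih _ (PySem.Set.nodup_add s x hs)

-- characterization of A's inner loop
lemma pvProcess_some (t : Int) (ns : List Int) : ∀ (q : List Int) (vis : PySem.Set Int)
    (lv : Int), t ∈ ns → (solveProcess t ns q vis lv).1 = some lv := by
  induction ns with
  | nil => intro q vis lv h; simp at h
  | cons n rest ih =>
    intro q vis lv h
    by_cases hn : n = t
    · simp [solveProcess, hn]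
    · have h' : t ∈ rest := by
        rcases List.mem_cons.1 h with h | h
        · exact absurd h.symm hn
        · exact h
      simp only [solveProcess, if_neg hn]
      split_ifs with h1
      · exact ih q vis lv h'
      · exact ih (q ++ [n]) (PySem.Set.add vis n) lv h'

lemma pvProcess_none (t : Int) (ns : List Int) : ∀ (q : List Int) (vis : PySem.Set Int)
    (lv : Int), t ∉ ns → vis.Nodup →
    ∃ new vis', solveProcess t ns q vis lv = (none, q ++ new, vis') ∧
      (∀ x, x ∈ new ↔ x ∈ ns ∧ x ∉ vis) ∧
      (∀ x, x ∈ vis' ↔ x ∈ vis ∨ x ∈ ns) ∧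
      vis'.Nodup ∧ vis'.length = vis.length + new.length := by
  induction ns with
  | nil =>
    intro q vis lv _ hnd
    exact ⟨[], vis, by simp [solveProcess], by simp, by simp, hnd, by simp⟩
  | cons n rest ih =>
    intro q vis lv ht hnd
    have hnt : ¬ n = t := fun h => ht (h ▸ List.mem_cons_self)
    have ht' : t ∉ rest := fun h => ht (List.mem_cons_of_mem _ h)
    simp only [solveProcess, if_neg hnt]
    by_cases hv : n ∈ vis
    · rw [if_pos (by rw [PySem.Set.contains_eq_decide]; exact decide_eq_true hv)]
      obtain ⟨new, vis', he, hnew, hvis, hnd', hlen⟩ := ih q vis lv ht' hnd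
      refine ⟨new, vis', he, fun x => ?_, fun x => ?_, hnd', hlen⟩
      · rw [hnew x]
        constructor
        · rintro ⟨hx, hxv⟩; exact ⟨List.mem_cons_of_mem _ hx, hxv⟩
        · rintro ⟨hx, hxv⟩
          rcases List.mem_cons.1 hx with rfl | hx
          · exact absurd hv hxv
          · exact ⟨hx, hxv⟩
      · rw [hvis x, List.mem_cons]
        constructor
        · rintro (hx | hx)
          · exact Or.inl hx
          · exact Or.inr (Or.inr hx)
        · rintro (hx | rfl | hx)
          · exact Or.inl hx
          · exact Or.inl hv
          · exact Or.inr hx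
    · rw [if_neg (by rw [PySem.Set.contains_eq_decide]; simp [hv])]
      obtain ⟨new, vis', he, hnew, hvis, hnd', hlen⟩ :=
        ih (q ++ [n]) (PySem.Set.add vis n) lv ht' (PySem.Set.nodup_add vis n hnd)
      refine ⟨n :: new, vis', by rw [he, List.append_assoc]; rfl, fun x => ?_, fun x => ?_,
        hnd', ?_⟩
      · rw [List.mem_cons, hnew x, PySem.Set.mem_add, List.mem_cons]
        constructor
        · rintro (rfl | ⟨hx, hxv⟩)
          · exact ⟨Or.inl rfl, hv⟩
          · exact ⟨Or.inr hx, fun hc => hxv (Or.inl hc)⟩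
        · rintro ⟨rfl | hx, hxv⟩
          · exact Or.inl rfl
          · by_cases hxn : x = n
            · exact Or.inl hxn
            · exact Or.inr ⟨hx, by rintro (hc | hc) <;> [exact hxv hc; exact hxn hc]⟩
      · rw [hvis x, PySem.Set.mem_add, List.mem_cons]
        tauto
      · rw [hlen, pvSet_add_not_mem hv, List.length_append, List.length_cons]
        simp; omega

-- characterization of B's inner loop
lemma pvInner_some (g : List (List Int)) (t : Int) (us : List Int) (nxt : PySem.Set Int)
    (lv : Int) (h : ∃ u ∈ us, t ∈ pvAdj g u) :
    (solveAltInner g (g.length : Int) t us nxt lv).1 = some lv := by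
  induction us generalizing nxt with
  | nil => obtain ⟨u, hu, _⟩ := h; simp at hu
  | cons u rest ih =>
    simp only [solveAltInner]
    split_ifs with h1 h2
    · rfl
    · apply ih
      obtain ⟨u0, hu0, hadj⟩ := h
      rcases List.mem_cons.1 hu0 with rfl | hu0
      · exfalso; apply h2; unfold pvAdj at hadj; rw [if_pos h1] at hadj; exact hadj
      · exact ⟨u0, hu0, hadj⟩
    · apply ih
      obtain ⟨u0, hu0, hadj⟩ := h
      rcases List.mem_cons.1 hu0 with rfl | hu0
      · exfalso; unfold pvAdj at hadj; rw [if_neg h1] at hadj; simp at hadj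
      · exact ⟨u0, hu0, hadj⟩

lemma pvInner_none (g : List (List Int)) (t : Int) (us : List Int) :
    ∀ (nxt : PySem.Set Int) (lv : Int), (∀ u ∈ us, t ∉ pvAdj g u) → nxt.Nodup →
    ∃ nxt', solveAltInner g (g.length : Int) t us nxt lv = (none, nxt') ∧
      (∀ x, x ∈ nxt' ↔ x ∈ nxt ∨ ∃ u ∈ us, x ∈ pvAdj g u) ∧ nxt'.Nodup := by
  induction us with
  | nil =>
    intro nxt lv _ hnd
    exact ⟨nxt, rfl, by simp, hnd⟩
  | cons u rest ih =>
    intro nxt lv ht hnd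
    have ht' : ∀ u' ∈ rest, t ∉ pvAdj g u' := fun u' hu' => ht u' (List.mem_cons_of_mem _ hu')
    simp only [solveAltInner]
    split_ifs with h1 h2
    · exfalso
      apply ht u List.mem_cons_self
      unfold pvAdj; rw [if_pos h1]; exact h2
    · obtain ⟨nxt', he, hmem, hnd'⟩ :=
        ih (PySem.Set.update nxt ((PySem.List.pyGet? g u).getD [])) lv ht'
          (pvNodup_update _ nxt hnd)
      refine ⟨nxt', he, fun x => ?_, hnd'⟩
      rw [hmem x, PySem.Set.mem_update]
      have hadj : pvAdj g u = (PySem.List.pyGet? g u).getD [] := by unfold pvAdj; rw [if_pos h1]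
      constructor
      · rintro ((hx | hx) | ⟨u0, hu0, hx⟩)
        · exact Or.inl hx
        · exact Or.inr ⟨u, List.mem_cons_self, hadj ▸ hx⟩
        · exact Or.inr ⟨u0, List.mem_cons_of_mem _ hu0, hx⟩
      · rintro (hx | ⟨u0, hu0, hx⟩)
        · exact Or.inl (Or.inl hx)
        · rcases List.mem_cons.1 hu0 with rfl | hu0
          · exact Or.inl (Or.inr (hadj ▸ hx))
          · exact Or.inr ⟨u0, hu0, hx⟩
    · obtain ⟨nxt', he, hmem, hnd'⟩ := ih nxt lv ht' hnd
      refine ⟨nxt', he, fun x => ?_, hnd'⟩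
      rw [hmem x]
      have hadj : pvAdj g u = [] := by unfold pvAdj; rw [if_neg h1]
      constructor
      · rintro (hx | ⟨u0, hu0, hx⟩)
        · exact Or.inl hx
        · exact Or.inr ⟨u0, List.mem_cons_of_mem _ hu0, hx⟩
      · rintro (hx | ⟨u0, hu0, hx⟩)
        · exact Or.inl hx
        · rcases List.mem_cons.1 hu0 with rfl | hu0
          · rw [hadj] at hx; simp at hx
          · exact Or.inr ⟨u0, hu0, hx⟩

-- A's loop computes the common answer
lemma pvALoop (g : List (List Int)) (t : Int) :
    ∀ (fa : Nat) (k : Nat) (q1 q2 : List Int) (vis : PySem.Set Int) (procd : Int → Prop),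
    (∀ x, pvExact g t k x ↔ procd x ∨ x ∈ q1) →
    (∀ u, procd u → t ∉ pvAdj g u) →
    (∀ x ∈ q1, pvExact g t k x) →
    (∀ x, x ∈ q2 ↔ ¬ pvDLe g t k x ∧ ∃ u, procd u ∧ x ∈ pvAdj g u) →
    (∀ x, x ∈ vis ↔ (pvDLe g t k x ∧ x ≠ t) ∨ x ∈ q2) →
    vis.Nodup →
    (∀ j, j < k → ¬ pvHit g t j) →
    2 * ((q1.length + q2.length) + ((t :: g.flatten).length - vis.length)) +
      (if q1.length = 0 then 2 else 1) ≤ fa →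
    pvSpecVal g t (solveLoop fa t (pvBuildDict g) (q1 ++ q2) vis q1.length ((k : Int) + 1)) := by
  intro fa
  induction fa with
  | zero =>
    intro k q1 q2 vis procd _ _ _ _ _ _ _ hf
    have h1 : (1 : Nat) ≤ if q1.length = 0 then 2 else 1 := by split <;> omega
    omega
  | succ fa ih =>
    intro k q1 q2 vis procd H1 H2 H1b H3 H4 hnd hnohit hf
    have hUlen : (t :: g.flatten).length = g.flatten.length + 1 := List.length_cons
    have hvisU : ∀ x ∈ vis, x ∈ t :: g.flatten := by
      intro x hx
      rcases (H4 x).1 hx with ⟨hd, _⟩ | hq2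
      · exact pvDLe_mem_U g t k x hd
      · obtain ⟨_, u, _, hadj⟩ := (H3 x).1 hq2
        exact List.mem_cons_of_mem _ (pvAdj_sub_flatten g u x hadj)
    have hvlen : vis.length ≤ (t :: g.flatten).length := pvCard_le hnd hvisU
    -- shared facts when the whole batch has been processed (q1 = [])
    have hbridge : q1 = [] → ∀ x, ¬ pvDLe g t k x →
        ((∃ u, procd u ∧ x ∈ pvAdj g u) ↔ ∃ u, pvDLe g t k u ∧ x ∈ pvAdj g u) := by
      intro hq1 x hndk
      constructor
      · rintro ⟨u, hu, hadj⟩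
        exact ⟨u, ((H1 u).2 (Or.inl hu)).1, hadj⟩
      · rintro ⟨u, hu, hadj⟩
        obtain ⟨j, hjk, hex⟩ := pvLeast g t k u hu
        rcases Nat.lt_or_ge j k with hj | hj
        · exact absurd (pvDLe_mono g t hj (Or.inr ⟨u, hex.1, hadj⟩ :
            pvDLe g t (j + 1) x)) hndk
        · have : pvExact g t k u := by
            have : j = k := le_antisymm hjk hj
            exact this ▸ hex
          rcases (H1 u).1 this with hp | hq
          · exact ⟨u, hp, hadj⟩
          · rw [hq1] at hq; simp at hq
    have hnohitk : q1 = [] → ¬ pvHit g t k := by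
      intro hq1
      rintro ⟨u, hu, hadj⟩
      obtain ⟨j, hjk, hex⟩ := pvLeast g t k u hu
      rcases Nat.lt_or_ge j k with hj | hj
      · exact hnohit j hj ⟨u, hex.1, hadj⟩
      · have hjk' : j = k := le_antisymm hjk hj
        subst hjk'
        rcases (H1 u).1 hex with hp | hq
        · exact H2 u hp hadj
        · rw [hq1] at hq; simp at hq
    cases q1 with
    | nil =>
      cases hq2 : q2 with
      | nil =>
        subst hq2
        show pvSpecVal g t (solveLoop (fa + 1) t (pvBuildDict g) [] vis 0 ((k : Int) + 1))
        have hres : solveLoop (fa + 1) t (pvBuildDict g) [] vis 0 ((k : Int) + 1) = -1 := rfl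
        rw [hres]
        refine Or.inr ⟨?_, rfl⟩
        have hstep : ∀ x, pvDLe g t (k + 1) x → pvDLe g t k x := by
          intro x hx
          rcases hx with hx | ⟨u, hu, hadj⟩
          · exact hx
          · by_contra hndk
            have := (hbridge rfl x hndk).2 ⟨u, hu, hadj⟩
            have := (H3 x).2 ⟨hndk, this⟩
            simp at this
        intro K hK
        rcases Nat.le_total K k with h | h
        · exact hnohitk rfl (by obtain ⟨u, hdu, ha⟩ := hK; exact ⟨u, pvDLe_mono g t h hdu, ha⟩)
        · obtain ⟨u, hdu, ha⟩ := hK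
          exact hnohitk rfl ⟨u, pvStab g t k hstep K h u hdu, ha⟩
      | cons n rest =>
        subst hq2
        have hQ : ∀ x, x ∈ n :: rest ↔ pvExact g t (k + 1) x := by
          intro x
          rw [pvExact_succ]
          constructor
          · intro hx
            obtain ⟨hndk, hpu⟩ := (H3 x).1 hx
            exact ⟨hndk, (hbridge rfl x hndk).1 hpu⟩
          · rintro ⟨hndk, hu⟩
            exact (H3 x).2 ⟨hndk, (hbridge rfl x hndk).2 hu⟩
        have hres := ih (k + 1) (n :: rest) [] vis (fun _ => False)
          (by intro x; rw [← hQ x]; simp)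
          (fun u h => h.elim)
          (fun x hx => (hQ x).1 hx)
          (by
            intro x
            constructor
            · intro hx; simp at hx
            · rintro ⟨_, u, hu, _⟩; exact hu.elim)
          (by
            intro x
            constructor
            · intro hx
              rcases (H4 x).1 hx with ⟨hd, hxt⟩ | hq2
              · exact Or.inl ⟨Or.inl hd, hxt⟩
              · refine Or.inl ⟨((hQ x).1 hq2).1, ?_⟩
                rintro rfl
                obtain ⟨_, u, hu, hadj⟩ := (H3 x).1 hq2
                exact H2 u hu hadj
            · rintro (⟨hd, hxt⟩ | hx)
              · rcases hd with hd | he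
                · exact (H4 x).2 (Or.inl ⟨hd, hxt⟩)
                · by_cases hdk : pvDLe g t k x
                  · exact (H4 x).2 (Or.inl ⟨hdk, hxt⟩)
                  · refine (H4 x).2 (Or.inr ((hQ x).2 ?_))
                    rw [pvExact_succ]
                    exact ⟨hdk, he⟩
              · simp at hx)
          hnd
          (by
            intro j hj
            rcases Nat.lt_succ_iff_lt_or_eq.1 hj with hj | rfl
            · exact hnohit j hj
            · exact hnohitk rfl)
          (by
            have hv2 := hvlen
            simp only [List.length_cons, List.length_nil] at hv2 hf ⊢
            norm_num at hf
            have he2 : g.flatten.length = (List.map List.length g).sum := by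
              simp [List.length_flatten]
            split <;> omega)
        rw [List.append_nil] at hres
        have hc : (((k + 1 : Nat)) : Int) + 1 = ((k : Int) + 1) + 1 := by push_cast; ring
        rw [hc] at hres
        exact hres
    | cons n q1' =>
      have hlen : (n :: q1').length = q1'.length + 1 := List.length_cons
      rw [hlen, List.cons_append]
      have hgd : (pvBuildDict g).getD n [] = pvAdj g n := pvGetD_build g n
      by_cases hhit : t ∈ pvAdj g n
      · have hres := pvProcess_some t (pvAdj g n) (q1' ++ q2) vis ((k : Int) + 1) hhit
        refine Or.inl ⟨k, ⟨n, (H1b n List.mem_cons_self).1, hhit⟩, hnohit, ?_⟩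
        show solveLoop (fa + 1) t (pvBuildDict g) (n :: (q1' ++ q2)) vis (q1'.length + 1)
          ((k : Int) + 1) = (k : Int) + 1
        simp only [solveLoop]
        rw [hgd]
        rcases hP : solveProcess t (pvAdj g n) (q1' ++ q2) vis ((k : Int) + 1) with ⟨o, qq, vv⟩
        rw [hP] at hres
        simp only at hres
        rw [hres]
      · obtain ⟨new, vis', he, hnew, hvis, hnd', hlenv⟩ :=
          pvProcess_none t (pvAdj g n) (q1' ++ q2) vis ((k : Int) + 1) hhit hnd
        have hnewU : ∀ x ∈ new, x ∈ t :: g.flatten := by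
          intro x hx
          exact List.mem_cons_of_mem _ (pvAdj_sub_flatten g n x ((hnew x).1 hx).1)
        have hstep : solveLoop (fa + 1) t (pvBuildDict g) (n :: (q1' ++ q2)) vis
            (q1'.length + 1) ((k : Int) + 1)
            = solveLoop fa t (pvBuildDict g) (q1' ++ (q2 ++ new)) vis' q1'.length
              ((k : Int) + 1) := by
          simp only [solveLoop]
          rw [hgd, he, List.append_assoc]
        rw [hstep]
        refine ih k q1' (q2 ++ new) vis' (fun u => procd u ∨ u = n) ?_ ?_
          (fun x hx => H1b x (List.mem_cons_of_mem _ hx)) ?_ ?_ hnd' hnohit ?_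
        · intro x
          rw [H1 x, List.mem_cons]
          tauto
        · rintro u (hu | rfl)
          · exact H2 u hu
          · exact hhit
        · intro x
          rw [List.mem_append, H3 x, hnew x]
          constructor
          · rintro (⟨hndk, u, hu, hadj⟩ | ⟨hxa, hxv⟩)
            · exact ⟨hndk, u, Or.inl hu, hadj⟩
            · refine ⟨?_, n, Or.inr rfl, hxa⟩
              intro hd
              have hxt : x ≠ t := by rintro rfl; exact hhit hxa
              exact hxv ((H4 x).2 (Or.inl ⟨hd, hxt⟩))
          · rintro ⟨hndk, u, hu | rfl, hadj⟩
            · exact Or.inl ⟨hndk, u, hu, hadj⟩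
            · by_cases hxv : x ∈ vis
              · rcases (H4 x).1 hxv with ⟨hd, _⟩ | hq2
                · exact absurd hd hndk
                · exact Or.inl ((H3 x).1 hq2)
              · exact Or.inr ⟨hadj, hxv⟩
        · intro x
          rw [hvis x, List.mem_append]
          constructor
          · rintro (hxv | hxa)
            · rcases (H4 x).1 hxv with hd | hq2
              · exact Or.inl hd
              · exact Or.inr (Or.inl hq2)
            · by_cases hxv : x ∈ vis
              · rcases (H4 x).1 hxv with hd | hq2
                · exact Or.inl hd
                · exact Or.inr (Or.inl hq2)
              · exact Or.inr (Or.inr ((hnew x).2 ⟨hxa, hxv⟩))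
          · rintro (hd | hq2 | hxn)
            · exact Or.inl ((H4 x).2 (Or.inl hd))
            · exact Or.inl ((H4 x).2 (Or.inr hq2))
            · exact Or.inr ((hnew x).1 hxn).1
        · have hvlen' : vis'.length ≤ (t :: g.flatten).length :=
            pvCard_le hnd' (fun y hy => by
              rcases (hvis y).1 hy with h | h
              · exact hvisU y h
              · exact List.mem_cons_of_mem _ (pvAdj_sub_flatten g n y h))
          have hv2 := hvlen
          have hc1 : (if (n :: q1').length = 0 then 2 else 1) = 1 := by simp
          rw [hc1] at hf
          have hc2 : (if q1'.length = 0 then 2 else 1) ≤ 2 := by split <;> omega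
          simp only [List.length_cons, List.length_append] at hv2 hvlen' hf ⊢
          omega

-- B's loop computes the common answer
lemma pvBLoop (g : List (List Int)) (t : Int) :
    ∀ (fb : Nat) (L : Nat) (reach : PySem.Set Int),
    (∀ x, x ∈ reach ↔ pvDLe g t L x) →
    reach.Nodup →
    (∀ j, j < L → ¬ pvHit g t j) →
    ((t :: g.flatten).length - reach.length) + 1 ≤ fb →
    pvSpecVal g t (solveAltLoop fb g (g.length : Int) t reach (L : Int)) := by
  intro fb
  induction fb with
  | zero => intro L reach _ _ _ hf; omega
  | succ fb ih =>
    intro L reach hchar hnd hnohit hf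
    by_cases hhit : ∃ u ∈ reach, t ∈ pvAdj g u
    · obtain ⟨u, hu, hadj⟩ := hhit
      refine Or.inl ⟨L, ⟨u, (hchar u).1 hu, hadj⟩, hnohit, ?_⟩
      have h1 := pvInner_some g t reach (PySem.Set.ofList reach) ((L : Int) + 1) ⟨u, hu, hadj⟩
      simp only [solveAltLoop]
      rcases hI : solveAltInner g (g.length : Int) t reach (PySem.Set.ofList reach)
        ((L : Int) + 1) with ⟨o, nx⟩
      rw [hI] at h1
      simp only at h1
      rw [h1]
    · push_neg at hhit
      obtain ⟨nxt', he, hmem, hnd'⟩ := pvInner_none g t reach (PySem.Set.ofList reach)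
        ((L : Int) + 1) hhit (PySem.Set.nodup_ofList reach)
      have hm' : ∀ x, x ∈ nxt' ↔ pvDLe g t (L + 1) x := by
        intro x
        rw [hmem x, PySem.Set.mem_ofList]
        show _ ↔ pvDLe g t L x ∨ ∃ u, pvDLe g t L u ∧ x ∈ pvAdj g u
        constructor
        · rintro (hx | ⟨u, hu, hx⟩)
          · exact Or.inl ((hchar x).1 hx)
          · exact Or.inr ⟨u, (hchar u).1 hu, hx⟩
        · rintro (hx | ⟨u, hu, hx⟩)
          · exact Or.inl ((hchar x).2 hx)
          · exact Or.inr ⟨u, (hchar u).2 hu, hx⟩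
      have hnohitL : ¬ pvHit g t L := by
        rintro ⟨u, hdu, hadj⟩
        exact hhit u ((hchar u).2 hdu) hadj
      simp only [solveAltLoop]
      rw [he]
      simp only
      by_cases heq : PySem.Set.equal nxt' reach = true
      · rw [if_pos heq]
        refine Or.inr ⟨?_, rfl⟩
        have hstep : ∀ x, pvDLe g t (L + 1) x → pvDLe g t L x := by
          intro x hx
          exact (hchar x).1 (((PySem.Set.equal_iff nxt' reach).1 heq x).1 ((hm' x).2 hx))
        intro K hK
        rcases Nat.le_total K L with h | h
        · exact hnohitL (by obtain ⟨u, hdu, ha⟩ := hK; exact ⟨u, pvDLe_mono g t h hdu, ha⟩)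
        · obtain ⟨u, hdu, ha⟩ := hK
          exact hnohitL ⟨u, pvStab g t L hstep K h u hdu, ha⟩
      · rw [if_neg heq]
        have hsub : ∀ x ∈ reach, x ∈ nxt' := by
          intro x hx
          exact (hm' x).2 (Or.inl ((hchar x).1 hx))
        have hex : ∃ x, x ∈ nxt' ∧ x ∉ reach := by
          have hne : ¬ ∀ x, x ∈ nxt' ↔ x ∈ reach :=
            fun hall => heq ((PySem.Set.equal_iff _ _).2 hall)
          push_neg at hne
          obtain ⟨x, hx⟩ := hne
          rcases hx with ⟨hxn, hxr⟩ | ⟨hxn, hxr⟩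
          · exact ⟨x, hxn, hxr⟩
          · exact absurd (hsub x hxr) hxn
        obtain ⟨x, hxn, hxr⟩ := hex
        have hlt : reach.length < nxt'.length := pvCard_lt hnd hnd' hsub x hxn hxr
        have hle : nxt'.length ≤ (t :: g.flatten).length :=
          pvCard_le hnd' (fun y hy => pvDLe_mem_U g t (L + 1) y ((hm' y).1 hy))
        have hc : (((L + 1 : Nat)) : Int) = (L : Int) + 1 := by push_cast; ring
        have := ih (L + 1) nxt' hm' hnd'
          (fun j hj => by
            rcases Nat.lt_succ_iff_lt_or_eq.1 hj with hj | rfl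
            · exact hnohit j hj
            · exact hnohitL)
          (by omega)
        rw [hc] at this
        exact this

lemma pvNoHit_nil (t : Int) (K : Nat) : ¬ pvHit [] t K := by
  rintro ⟨u, _, hadj⟩
  unfold pvAdj at hadj
  split_ifs at hadj with hc
  · simp at hc; omega
  · simp at hadj

lemma pvExact_zero (g : List (List Int)) (t x : Int) : pvExact g t 0 x ↔ x = t := by
  constructor
  · rintro ⟨h, _⟩; exact h
  · intro h; exact ⟨h, by omega⟩

lemma pvA_spec (g : List (List Int)) (t : Int) : pvSpecVal g t (solve g t) := by
  by_cases hg : g = []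
  · subst hg
    exact Or.inr ⟨fun K => pvNoHit_nil t K, by simp [solve]⟩
  · unfold solve
    rw [if_neg hg]
    have h6 : 2 * (g.map List.length).sum + 6 = (2 * (g.map List.length).sum + 5) + 1 := by
      omega
    rw [h6]
    have hstep : solveLoop ((2 * (g.map List.length).sum + 5) + 1) t (pvBuildDict g) [t]
        PySem.Set.empty 0 0
        = solveLoop (2 * (g.map List.length).sum + 5) t (pvBuildDict g) [t]
          PySem.Set.empty ([t] : List Int).length ((0 : Int) + 1) := rfl
    rw [hstep]
    have hres := pvALoop g t (2 * (g.map List.length).sum + 5) 0 [t] [] PySem.Set.empty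
      (fun _ => False)
      (by
        intro x
        rw [pvExact_zero]
        simp)
      (fun u h => h.elim)
      (by
        intro x hx
        simp at hx
        exact (pvExact_zero g t x).2 hx)
      (by
        intro x
        constructor
        · intro hx; simp at hx
        · rintro ⟨_, u, hu, _⟩; exact hu.elim)
      (by
        intro x
        constructor
        · intro hx; simp [PySem.Set.empty] at hx
        · rintro (⟨hd, hxt⟩ | hx)
          · exact absurd (show x = t from hd) hxt
          · simp at hx)
      (by simp [PySem.Set.empty])
      (by omega)
      (by
        have he2 : g.flatten.length = (List.map List.length g).sum := by
          simp [List.length_flatten]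
        simp [PySem.Set.empty]
        omega)
    rw [List.append_nil, Nat.cast_zero] at hres
    exact hres

lemma pvB_spec (g : List (List Int)) (t : Int) : pvSpecVal g t (solve_alt g t) := by
  by_cases hg : g = []
  · subst hg
    exact Or.inr ⟨fun K => pvNoHit_nil t K, by simp [solve_alt]⟩
  · unfold solve_alt
    rw [if_neg hg, pvSet_add_not_mem (by simp : t ∉ (PySem.Set.empty : PySem.Set Int)),
      (rfl : (PySem.Set.empty : PySem.Set Int) ++ [t] = [t])]
    have hres := pvBLoop g t (g.flatten.length + 2) 0 [t]
      (by
        intro x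
        simp only [List.mem_singleton]
        simp [pvDLe])
      (by simp)
      (fun j hj => absurd hj (by omega))
      (by simp only [List.length_cons]; omega)
    rw [Nat.cast_zero] at hres
    exact hres

-- ===== VERDICT (by name: the statement is the Claim_ definition above) =====
theorem solve_spec : Claim_equal_solve := by
  intro g t _
  exact pvSpecVal_unique g t _ _ (pvA_spec g t) (pvB_spec g t)
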